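-- pv_equiv track=rewrite | github.com/elite-se/safety.nusmv-brute-force | util/smvFileParser.py | extractChecks
-- ===== SOURCE A (Python) =====
-- def extractChecks(smvFileContent: str):
--     smvFileLines = smvFileContent.splitlines()
--     checkConcluded = True
--     smvWithoutChecks = []
--     smvChecks = []
--     for line in smvFileLines:
--         if line.startswith('CTLSPEC') or line.startswith('LTLSPEC'):
--             checkConcluded = True
--             smvChecks.append(line)
--             if ";" not in line:
--                 checkConcluded = False
--         elif checkConcluded or line.startswith('DEFINE') or line.startswith('--') or line.isspace():
--             # this line does not belong to a check anymore
--             smvWithoutChecks.append(line + '\n')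
--             checkConcluded = True
--         else:
--             # this is a multiline LTL/CTL Spec
--             smvChecks[-1] += ' ' + line.replace('\t', ' ').replace('  ', ' ')
--
--     return smvWithoutChecks, smvChecks
-- ===== SOURCE B (Python) =====
-- def extractChecks(smvFileContent: str):
--     # Index-driven rewrite: an outer while-loop over line indices with a nested
--     # loop that consumes the continuation lines of a multi-line spec; the line
--     # that terminates a continuation is re-processed by the outer loop.
--     lines = smvFileContent.splitlines()
--     n = len(lines)
--     smvWithoutChecks = []
--     smvChecks = []
--     i = 0
--     while i < n:
--         line = lines[i]
--         if line.startswith('CTLSPEC') or line.startswith('LTLSPEC'):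
--             smvChecks.append(line)
--             i += 1
--             if ';' not in line:
--                 while i < n:
--                     nxt = lines[i]
--                     if (nxt.startswith('CTLSPEC') or nxt.startswith('LTLSPEC')
--                             or nxt.startswith('DEFINE') or nxt.startswith('--')
--                             or nxt.isspace()):
--                         break
--                     smvChecks[-1] += ' ' + nxt.replace('\t', ' ').replace('  ', ' ')
--                     i += 1
--         else:
--             smvWithoutChecks.append(line + '\n')
--             i += 1
--     return smvWithoutChecks, smvChecks
-- ===== Notes on version B (the rewrite author's own statement) =====
-- stated objective: alternative
-- what changed: The flat single-pass state machine with a checkConcluded boolean flag is replaced by an index-driven outer while-loop with a nested inner loop that consumes the continuation lines of a multi-line spec, the terminating line being re-processed by the outer loop; the flag disappears.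
import Mathlib
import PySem

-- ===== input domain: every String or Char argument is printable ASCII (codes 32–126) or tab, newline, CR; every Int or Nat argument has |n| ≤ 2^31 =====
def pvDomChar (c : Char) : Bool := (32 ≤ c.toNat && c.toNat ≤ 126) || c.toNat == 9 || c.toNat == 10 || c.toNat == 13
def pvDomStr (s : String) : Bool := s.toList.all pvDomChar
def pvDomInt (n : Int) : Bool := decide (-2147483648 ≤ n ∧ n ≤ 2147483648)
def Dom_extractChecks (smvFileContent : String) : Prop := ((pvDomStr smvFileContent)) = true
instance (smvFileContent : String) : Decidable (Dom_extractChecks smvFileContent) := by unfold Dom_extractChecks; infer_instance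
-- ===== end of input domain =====

-- B changes the decomposition: the flat one-state fold becomes an outer loop with a
-- nested continuation-consuming loop (objective: alternative; same cost).


-- ===== PORT A =====
-- loop body of A's for-loop; state = (checkConcluded, smvWithoutChecks, smvChecks)
def extractChecksStep (st : Bool × List String × List String) (line : String) :
    Bool × List String × List String :=
  let checkConcluded := st.1
  let smvWithoutChecks := st.2.1
  let smvChecks := st.2.2
  if PySem.Str.startswith line "CTLSPEC" || PySem.Str.startswith line "LTLSPEC" then
    let smvChecks := smvChecks ++ [line]
    if !(PySem.Str.isIn ";" line) then (false, smvWithoutChecks, smvChecks)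
    else (true, smvWithoutChecks, smvChecks)
  else if checkConcluded || PySem.Str.startswith line "DEFINE" ||
      PySem.Str.startswith line "--" || PySem.Str.strIsspace line then
    (true, smvWithoutChecks ++ [line ++ "\n"], smvChecks)
  else
    -- Python's `smvChecks[-1] += …` (smvChecks is provably nonempty whenever this
    -- branch runs, since checkConcluded = false only after a spec line was appended;
    -- the none case is unreachable, Python would raise IndexError there)
    match smvChecks.getLast? with
    | none => (checkConcluded, smvWithoutChecks, smvChecks)
    | some c =>
        (checkConcluded, smvWithoutChecks,
          smvChecks.dropLast ++
            [c ++ " " ++ PySem.Str.replace (PySem.Str.replace line "\t" " ") "  " " "])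

def extractChecks (smvFileContent : String) : List String × List String :=
  let r := (PySem.Str.splitlines smvFileContent).foldl extractChecksStep (true, [], [])
  (r.2.1, r.2.2)

-- ===== PORT B =====
-- inner loop of B: consume the continuation lines of the open spec `acc`,
-- returning the extended spec and the unconsumed remainder of the lines
def extractChecksAltConsume (rest : List String) (acc : String) : String × List String :=
  match rest with
  | [] => (acc, [])
  | nxt :: ls =>
    if PySem.Str.startswith nxt "CTLSPEC" || PySem.Str.startswith nxt "LTLSPEC" ||
        PySem.Str.startswith nxt "DEFINE" || PySem.Str.startswith nxt "--" ||
        PySem.Str.strIsspace nxt then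
      (acc, nxt :: ls)
    else
      extractChecksAltConsume ls
        (acc ++ " " ++ PySem.Str.replace (PySem.Str.replace nxt "\t" " ") "  " " ")

theorem extractChecksAltConsume_length_le (rest : List String) (acc : String) :
    (extractChecksAltConsume rest acc).2.length ≤ rest.length := by
  induction rest generalizing acc with
  | nil => simp [extractChecksAltConsume]
  | cons nxt ls ih =>
    simp only [extractChecksAltConsume]
    split
    · simp
    · exact le_trans (ih _) (by simp)

-- outer loop of B (the Python `while i < n`, written as recursion on the
-- remaining lines; `rest` is the suffix the re-processed break line starts)
def extractChecksAltGo (lines : List String) (without checks : List String) :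
    List String × List String :=
  match lines with
  | [] => (without, checks)
  | line :: ls =>
    if PySem.Str.startswith line "CTLSPEC" || PySem.Str.startswith line "LTLSPEC" then
      if !(PySem.Str.isIn ";" line) then
        extractChecksAltGo (extractChecksAltConsume ls line).2 without
          (checks ++ [(extractChecksAltConsume ls line).1])
      else
        extractChecksAltGo ls without (checks ++ [line])
    else
      extractChecksAltGo ls (without ++ [line ++ "\n"]) checks
termination_by lines.length
decreasing_by
  · exact Nat.lt_succ_of_le (extractChecksAltConsume_length_le ls line)
  · simp
  · simp

def extractChecks_alt (smvFileContent : String) : List String × List String :=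
  extractChecksAltGo (PySem.Str.splitlines smvFileContent) [] []

-- ===== PRECONDITION & SPEC =====
def Spec_extractChecks (smvFileContent : String) (out : List String × List String) : Prop := out = extractChecks_alt smvFileContent
instance (smvFileContent : String) (out : List String × List String) : Decidable (Spec_extractChecks smvFileContent out) := by unfold Spec_extractChecks; infer_instance

-- ===== CLAIM (what is proved, stated in full; the proofs are below) =====
def Claim_equal_extractChecks : Prop := ∀ (smvFileContent : String), Dom_extractChecks smvFileContent → Spec_extractChecks smvFileContent (extractChecks smvFileContent)

-- ===== LEMMAS AND PROOFS =====

-- Main invariant, proved mutually over the line list: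
-- (concluded state) A's fold from (true, w, cs) computes B's outer loop, and
-- (open-spec state)  A's fold from (false, w, cs ++ [c]) computes B's inner loop
-- on c followed by the outer loop on the unconsumed remainder.
theorem extractChecks_fold_eq (lines : List String) :
    (∀ w cs, (lines.foldl extractChecksStep (true, w, cs)).2 =
        extractChecksAltGo lines w cs) ∧
    (∀ w cs c, (lines.foldl extractChecksStep (false, w, cs ++ [c])).2 =
        extractChecksAltGo (extractChecksAltConsume lines c).2 w
          (cs ++ [(extractChecksAltConsume lines c).1])) := by
  induction lines with
  | nil =>
    refine ⟨fun w cs => ?_, fun w cs c => ?_⟩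
    · simp [extractChecksAltGo]
    · simp [extractChecksAltGo, extractChecksAltConsume]
  | cons line ls ih =>
    obtain ⟨ihP, ihQ⟩ := ih
    refine ⟨fun w cs => ?_, fun w cs c => ?_⟩
    · -- concluded state
      rw [extractChecksAltGo, List.foldl_cons]
      simp only [extractChecksStep]
      by_cases hspec : (PySem.Str.startswith line "CTLSPEC" ||
          PySem.Str.startswith line "LTLSPEC") = true
      · rw [if_pos hspec, if_pos hspec]
        by_cases hsemi : (!PySem.Str.isIn ";" line) = true
        · rw [if_pos hsemi, if_pos hsemi]; exact ihQ w cs line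
        · rw [if_neg hsemi, if_neg hsemi]; exact ihP w (cs ++ [line])
      · rw [if_neg hspec, if_neg hspec, if_pos (by simp)]
        exact ihP (w ++ [line ++ "\n"]) cs
    · -- open-spec state: B's inner loop examines `line`
      rw [extractChecksAltConsume, List.foldl_cons]
      simp only [extractChecksStep]
      by_cases hspec : (PySem.Str.startswith line "CTLSPEC" ||
          PySem.Str.startswith line "LTLSPEC") = true
      · -- a new spec line closes the open spec and is re-processed by the outer loop
        have hbnd : (PySem.Str.startswith line "CTLSPEC" || PySem.Str.startswith line "LTLSPEC" ||
            PySem.Str.startswith line "DEFINE" || PySem.Str.startswith line "--" ||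
            PySem.Str.strIsspace line) = true := by
          simp only [Bool.or_eq_true] at hspec ⊢; tauto
        rw [if_pos hbnd]
        dsimp only
        rw [extractChecksAltGo, if_pos hspec, if_pos hspec]
        by_cases hsemi : (!PySem.Str.isIn ";" line) = true
        · rw [if_pos hsemi, if_pos hsemi]; exact ihQ w (cs ++ [c]) line
        · rw [if_neg hsemi, if_neg hsemi]; exact ihP w ((cs ++ [c]) ++ [line])
      · by_cases hb : (PySem.Str.startswith line "DEFINE" ||
            PySem.Str.startswith line "--" || PySem.Str.strIsspace line) = true
        · -- boundary line: the open spec is closed, the line goes to smvWithoutChecks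
          have hbnd : (PySem.Str.startswith line "CTLSPEC" || PySem.Str.startswith line "LTLSPEC" ||
              PySem.Str.startswith line "DEFINE" || PySem.Str.startswith line "--" ||
              PySem.Str.strIsspace line) = true := by
            simp only [Bool.or_eq_true] at hb ⊢; tauto
          have helif : (false || PySem.Str.startswith line "DEFINE" ||
              PySem.Str.startswith line "--" || PySem.Str.strIsspace line) = true := by
            simp only [Bool.or_eq_true, Bool.false_or] at hb ⊢; tauto
          rw [if_pos hbnd]
          dsimp only
          rw [extractChecksAltGo, if_neg hspec, if_neg hspec, if_pos helif]
          exact ihP (w ++ [line ++ "\n"]) (cs ++ [c])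
        · -- continuation line: appended to the open spec on both sides
          have hbnd : ¬ ((PySem.Str.startswith line "CTLSPEC" || PySem.Str.startswith line "LTLSPEC" ||
              PySem.Str.startswith line "DEFINE" || PySem.Str.startswith line "--" ||
              PySem.Str.strIsspace line) = true) := by
            simp only [Bool.or_eq_true] at hspec hb ⊢; tauto
          have helif : ¬ ((false || PySem.Str.startswith line "DEFINE" ||
              PySem.Str.startswith line "--" || PySem.Str.strIsspace line) = true) := by
            simp only [Bool.or_eq_true, Bool.false_or] at hb ⊢; tauto
          rw [if_neg hbnd, if_neg hspec, if_neg helif,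
            List.getLast?_concat, List.dropLast_concat]
          exact ihQ w cs
            (c ++ " " ++ PySem.Str.replace (PySem.Str.replace line "\t" " ") "  " " ")

theorem extractChecks_spec : Claim_equal_extractChecks := by
  intro s _
  unfold Spec_extractChecks extractChecks extractChecks_alt
  exact (extractChecks_fold_eq (PySem.Str.splitlines s)).1 [] []
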